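-- pv_equiv track=rewrite | github.com/SFRaj/number2malagasy | number2malagasy/main.py | combine_reverse
-- ===== SOURCE A (Python) =====
-- def combine_reverse(digit_words):
--     """
--     combines each digit word into a phrase (RECURSIVELY)
--     examples:
--     combine(['roa arivo', 'aotra', 'aotra', 'roa']) -> 'roa amby roa arivo' (not 'roa sy roa arivo')
--     combine(['roanjato', 'aotra', 'roa']) -> 'roa amby roanjato' (not 'roa sy roa arivo')
--     combine(['roanjato', 'roapolo', 'aotra']) -> 'roapolo sy roanjato' (not 'roapolo amby roanjato')
--     exceptions:
--     'sy zato' -> 'amby zato'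
--     'amby sy x arivo' -> 'amby x arivo' (e.g taona roa amby roa arivo) (when len(digit_words) == 4)
--     """
--     if len(digit_words) == 1:
--         phrase = digit_words[0]
--     elif len(digit_words) == 2:
--         phrase = ''
--         if digit_words[0] != '':
--             phrase = combine_reverse(digit_words[1:]) + ' ' + digit_words[0] + ' amby'
--         else:
--             phrase = combine_reverse(digit_words[1:])
--         return phrase
--     elif len(digit_words) > 2:
--         if digit_words[-1] != '':
--             if not all(p == '' for p in digit_words[1:-1]):
--                 phrase = digit_words[-1] + ' sy ' + combine_reverse(digit_words[:-1])
--             elif all(p == '' for p in digit_words[1:-1]):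
--                 phrase = digit_words[-1] + ' ' + combine_reverse(digit_words[:-1])
--             elif all(p == '' for p in digit_words[1:-1]) and len(digit_words) == 4:
--                 phrase = digit_words[-1] + ' ' + combine_reverse(digit_words[:-1])
--             elif all(p == '' for p in digit_words[1:-1]) and len(digit_words) > 4:
--                 phrase = digit_words[-1] + ' sy ' + combine_reverse(digit_words[:-1])
--         elif digit_words[-1] == '':
--             phrase = combine_reverse(digit_words[:-1])
--     phrase = phrase.replace('  ', ' ')
--     phrase = phrase.replace('amby ', 'amby')
--     phrase = phrase.replace('iray amby', 'iraika amby')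
--     return phrase
-- ===== SOURCE B (Python) =====
-- def combine_reverse(digit_words):
--     # Iterative left-to-right rebuild of the recursion: base chunk from the
--     # first one/two words, then prepend each later word with its connector,
--     # applying the per-level replacement chain after every step.
--     def rep(s):
--         return s.replace('  ', ' ').replace('amby ', 'amby').replace('iray amby', 'iraika amby')
--     n = len(digit_words)
--     if n == 1:
--         return rep(digit_words[0])
--     head, second = digit_words[0], digit_words[1]
--     acc = rep(second) if head == '' else rep(second) + ' ' + head + ' amby'
--     if n == 2:
--         return acc
--     mid_nonempty = second != ''
--     for last in digit_words[2:]: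
--         if last != '':
--             acc = (last + ' sy ' if mid_nonempty else last + ' ') + acc
--         acc = rep(acc)
--         mid_nonempty = mid_nonempty or last != ''
--     return acc
-- ===== Notes on version B (the rewrite author's own statement) =====
-- stated objective: alternative
-- what changed: Replaces A's right-peeling recursion (which rescans the middle of the list with all() at every level, and slices a copy per level) by a single left-to-right loop that keeps the accumulated phrase plus one running 'some middle word non-empty' flag, applying the same per-level replacement chain after each step.
-- outside the precondition, e.g. on combine_reverse([]): A raises UnboundLocalError, B raises IndexError
import Mathlib
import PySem

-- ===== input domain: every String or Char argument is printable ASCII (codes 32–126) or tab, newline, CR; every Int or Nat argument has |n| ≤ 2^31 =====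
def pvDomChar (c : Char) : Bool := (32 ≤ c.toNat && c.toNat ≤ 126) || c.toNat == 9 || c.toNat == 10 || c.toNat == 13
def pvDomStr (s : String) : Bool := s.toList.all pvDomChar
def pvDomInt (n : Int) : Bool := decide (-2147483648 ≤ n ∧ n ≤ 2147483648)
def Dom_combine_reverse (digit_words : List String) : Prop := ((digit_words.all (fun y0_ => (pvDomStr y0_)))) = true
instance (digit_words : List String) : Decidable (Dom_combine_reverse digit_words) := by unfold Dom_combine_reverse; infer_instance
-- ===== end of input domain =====

-- B replaces A's right-peeling recursion by one left-to-right loop with a running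
-- "some middle word non-empty" flag (objective: alternative decomposition; return values agree on Pre_).

-- ===== PORT A =====
-- the replacement chain both Pythons apply: phrase.replace('  ',' ').replace('amby ','amby').replace('iray amby','iraika amby')
-- (a helper in Source B; inlined at the end of A — shared here so each port cites the same chain)
def pvRepl (s : String) : String :=
  PySem.Str.replace (PySem.Str.replace (PySem.Str.replace s "  " " ") "amby " "amby") "iray amby" "iraika amby"

-- literal transliteration of A; the two dead elif arms repeat the already-taken 'all middle
-- words empty' test and can never fire, exactly as in Python.  On [] Python raises
-- UnboundLocalError (phrase unset); that input is excluded by Pre_.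
def combine_reverse (digit_words : List String) : String :=
  if digit_words.length = 1 then
    pvRepl (PySem.List.pyGetD digit_words 0 "")
  else if digit_words.length = 2 then
    if PySem.List.pyGetD digit_words 0 "" ≠ "" then
      combine_reverse (PySem.List.slice digit_words (some 1) none) ++ " " ++ PySem.List.pyGetD digit_words 0 "" ++ " amby"
    else
      combine_reverse (PySem.List.slice digit_words (some 1) none)
  else if 2 < digit_words.length then
    pvRepl (
      if PySem.List.pyGetD digit_words (-1) "" ≠ "" then
        if ¬ ((PySem.List.slice digit_words (some 1) (some (-1))).all (fun p => p == "")) then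
          PySem.List.pyGetD digit_words (-1) "" ++ " sy " ++ combine_reverse (PySem.List.slice digit_words none (some (-1)))
        else
          PySem.List.pyGetD digit_words (-1) "" ++ " " ++ combine_reverse (PySem.List.slice digit_words none (some (-1)))
      else
        combine_reverse (PySem.List.slice digit_words none (some (-1))))
  else
    pvRepl ""
termination_by digit_words.length
decreasing_by
  all_goals simp_all [PySem.List.slice_from_one, PySem.List.slice_to_neg_one, List.length_dropLast]
  all_goals omega

-- ===== PORT B =====
-- Source B's loop 'for last in digit_words[2:]': acc is the phrase so far, mid records whether
-- any word strictly between the first word and the current last one is non-empty.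
def pvAltLoop (acc : String) (mid : Bool) (rest : List String) : String :=
  match rest with
  | [] => acc
  | last :: rs =>
    pvAltLoop (pvRepl (if last ≠ "" then (if mid then last ++ " sy " else last ++ " ") ++ acc else acc)) (mid || last ≠ "") rs

def combine_reverse_alt (digit_words : List String) : String :=
  match digit_words with
  | [] => ""  -- unreachable under Pre_ (Source B raises IndexError here)
  | [w] => pvRepl w
  | w0 :: w1 :: rest =>
    let acc := if w0 = "" then pvRepl w1 else pvRepl w1 ++ " " ++ w0 ++ " amby"
    -- Source B's early 'return acc' for n == 2 is the rest = [] case of the loop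
    pvAltLoop acc (w1 ≠ "") rest


-- ===== PRECONDITION & SPEC =====
-- Pre_ excludes only the empty list, on which A raises UnboundLocalError (and B raises IndexError).
def Pre_combine_reverse (digit_words : List String) : Prop := digit_words ≠ []
instance (digit_words : List String) : Decidable (Pre_combine_reverse digit_words) := by unfold Pre_combine_reverse; infer_instance
def pvWitness_combine_reverse : List String := (["roa"])

def Spec_combine_reverse (digit_words : List String) (out : String) : Prop := out = combine_reverse_alt digit_words
instance (digit_words : List String) (out : String) : Decidable (Spec_combine_reverse digit_words out) := by unfold Spec_combine_reverse; infer_instance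

-- ===== CLAIM (what is proved, stated in full; the proofs are below) =====
def Claim_equal_combine_reverse : Prop := ∀ (digit_words : List String), Dom_combine_reverse digit_words → Pre_combine_reverse digit_words → Spec_combine_reverse digit_words (combine_reverse digit_words)

-- ===== LEMMAS AND PROOFS =====

theorem pvAltLoop_snoc (rs : List String) (x : String) (acc : String) (mid : Bool) :
    pvAltLoop acc mid (rs ++ [x]) =
      pvRepl (if x ≠ "" then
        (if (mid || rs.any (fun p => p ≠ "")) then x ++ " sy " else x ++ " ") ++ pvAltLoop acc mid rs
      else pvAltLoop acc mid rs) := by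
  induction rs generalizing acc mid with
  | nil => simp [pvAltLoop]
  | cons h t ih =>
    rw [List.cons_append, pvAltLoop, ih]
    conv_rhs => rw [pvAltLoop]
    simp only [List.any_cons, Bool.or_assoc]
    rfl

theorem slice_one_negone (w0 w1 : String) (rs : List String) (x : String) :
    PySem.List.slice (w0 :: w1 :: (rs ++ [x])) (some 1) (some (-1)) = w1 :: rs := by
  have h1 : ¬ ((rs.length : Int) + 1 + 1 < 0) := by omega
  have h2 : ((rs.length : Int) + 1 + 1).toNat = rs.length + 2 := by omega
  simp [PySem.List.slice, PySem.List.clampIdx, h1, h2, List.take_succ_cons]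

theorem combine_eq_loop (rest : List String) (w0 w1 : String) :
    combine_reverse (w0 :: w1 :: rest) =
      pvAltLoop (if w0 = "" then pvRepl w1 else pvRepl w1 ++ " " ++ w0 ++ " amby") (w1 ≠ "") rest := by
  induction rest using List.reverseRecOn with
  | nil =>
    rw [combine_reverse]
    simp only [List.length_cons, List.length_nil]
    norm_num
    rw [combine_reverse]
    simp [pvAltLoop, PySem.List.slice_from_one, PySem.List.pyGetD_zero_cons]
  | append_singleton rs x ih =>
    rw [combine_reverse]
    have h3 : ¬ ((w0 :: w1 :: (rs ++ [x])).length = 1) := by simp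
    have h4 : ¬ ((w0 :: w1 :: (rs ++ [x])).length = 2) := by simp
    have h5 : 2 < (w0 :: w1 :: (rs ++ [x])).length := by simp
    simp only [eq_false h3, eq_false h4, eq_true h5, if_false, if_true]
    have hlast : PySem.List.pyGetD (w0 :: w1 :: (rs ++ [x])) (-1) "" = x := by
      simpa using PySem.List.pyGetD_neg_one_append_singleton (xs := w0 :: w1 :: rs) (x := x) (d := "")
    have hdrop : PySem.List.slice (w0 :: w1 :: (rs ++ [x])) none (some (-1)) = w0 :: w1 :: rs := by
      rw [PySem.List.slice_to_neg_one, show w0 :: w1 :: (rs ++ [x]) = (w0 :: w1 :: rs) ++ [x] by simp, List.dropLast_concat]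
    rw [hlast, hdrop, slice_one_negone, ih, pvAltLoop_snoc]
    by_cases hx : x = ""
    · simp [hx]
    · simp only [hx, ne_eq, not_false_eq_true, if_true, ite_not]
      by_cases hm : ((decide (w1 ≠ "")) || rs.any (fun p => decide (p ≠ ""))) = true
      · have hall : ¬ (((w1 :: rs).all (fun p => p == "")) = true) := by
          simp only [List.all_eq_true, beq_iff_eq]
          rw [Bool.or_eq_true] at hm
          rcases hm with h | h
          · simp only [decide_eq_true_eq] at h
            intro hc; exact h (hc w1 (by simp))
          · rcases List.any_eq_true.1 h with ⟨p, hp, hpe⟩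
            simp only [decide_eq_true_eq] at hpe
            intro hc; exact hpe (hc p (by simp [hp]))
        rw [if_neg hall, if_pos hm]
      · have hall : (((w1 :: rs).all (fun p => p == "")) = true) := by
          simp only [Bool.or_eq_true, not_or, List.any_eq_true, not_exists, not_and,
            decide_eq_true_eq] at hm
          simp only [List.all_eq_true, beq_iff_eq]
          intro p hp
          rcases List.mem_cons.1 hp with rfl | hp
          · exact not_not.1 hm.1
          · exact not_not.1 (hm.2 p hp)
        rw [if_pos (by simpa using hall), if_neg hm]

-- ===== VERDICT (by name: the statement is the Claim_ definition above) =====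
theorem combine_reverse_spec : Claim_equal_combine_reverse := by
  unfold Claim_equal_combine_reverse
  intro dw _ hpre
  unfold Spec_combine_reverse
  match dw with
  | [] => exact absurd rfl hpre
  | [w] =>
    rw [combine_reverse]
    simp [combine_reverse_alt, PySem.List.pyGetD_zero_cons]
  | w0 :: w1 :: rest =>
    rw [combine_eq_loop]
    simp [combine_reverse_alt]
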